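-- pv_equiv track=rewrite | github.com/Voxel-Fox-Ltd/MarriageBot | cogs/utils/family_tree/relation_simplifier.py | relation_simplify_simple
-- ===== SOURCE A (Python) =====
-- def relation_simplify_simple(string:str, search_string:str) -> str:
--     '''
--     Simplifies down a range of "child's child's child's..." to one set of "[great...] grandchild
--
--     Params:
--         string: str
--             The string to be searched and modified
--         search_string: str
--             The name to be searched for and expanded upon
--     '''
--
--     # Split it to be able to iterate through
--     split = string.strip().split(' ')
--     new_string = ''
--     counter = 0
--     for i in split:
--         if i in [f"{search_string}'s", search_string]:
--             counter += 1
--         elif counter == 1: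
--             new_string += f"{search_string}'s {i} "
--             counter = 0
--         elif counter == 2:
--             new_string += f"grand{search_string}'s {i} "
--             counter = 0
--         elif counter > 2:
--             new_string += f"{'great ' * (counter - 2)}grand{search_string}'s {i} "
--             counter = 0
--         else:
--             new_string += i + ' '
--
--     # And repeat again for outside of the loop
--     if counter == 1:
--         new_string += f"{search_string}'s "
--         counter = 0
--     elif counter == 2:
--         new_string += f"grand{search_string}'s "
--         counter = 0
--     elif counter > 2:
--         new_string += f"{'great ' * (counter - 2)}grand{search_string}'s"
--         counter = 0
--
--     # Return new string
--     new_string = new_string.strip()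
--     if new_string.endswith("'s"):
--         return new_string[:-2]
--     return new_string
-- ===== SOURCE B (Python) =====
-- import itertools
--
--
-- def _prefix(search_string, n):
--     # prefix replacing a run of n repeated relation words
--     if n == 1:
--         return f"{search_string}'s"
--     return 'great ' * (n - 2) + 'grand' + f"{search_string}'s"
--
--
-- def relation_simplify_simple(string: str, search_string: str) -> str:
--     matches = {search_string, f"{search_string}'s"}
--     out = []
--     pending = None
--     for is_match, group in itertools.groupby(string.strip().split(' '),
--                                              key=lambda t: t in matches):
--         group = list(group)
--         if is_match:
--             pending = _prefix(search_string, len(group))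
--         else:
--             if pending is not None:
--                 out.append(pending)
--                 pending = None
--             out.extend(group)
--     if pending is not None:
--         out.append(pending)
--     result = ' '.join(out).strip()
--     return result[:-2] if result.endswith("'s") else result
-- ===== Notes on version B (the rewrite author's own statement) =====
-- stated objective: idiomatic
-- what changed: Replaces the character-by-character string accumulator with a counter by tokenizing once, grouping consecutive tokens with itertools.groupby on whether they match the search word, mapping each match-run to its great/grand prefix via a helper, and joining the emitted token list with ' '.join.
import Mathlib
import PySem

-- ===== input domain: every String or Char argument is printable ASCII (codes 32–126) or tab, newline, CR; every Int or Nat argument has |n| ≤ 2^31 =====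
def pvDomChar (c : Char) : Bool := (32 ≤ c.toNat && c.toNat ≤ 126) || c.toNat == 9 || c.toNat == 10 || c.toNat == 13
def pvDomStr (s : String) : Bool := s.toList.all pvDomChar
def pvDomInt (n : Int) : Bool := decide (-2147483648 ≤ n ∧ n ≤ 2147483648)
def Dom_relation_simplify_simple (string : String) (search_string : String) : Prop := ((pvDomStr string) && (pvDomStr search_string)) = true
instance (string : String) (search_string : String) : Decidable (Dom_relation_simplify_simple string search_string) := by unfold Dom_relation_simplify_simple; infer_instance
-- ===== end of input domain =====

-- B re-implements A as tokenize → group consecutive matching tokens (groupby) → map each run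
-- to its great/grand prefix → join; proved to return the same string (equivalence about the
-- return value only; neither program mutates its arguments).

-- ===== PORT A =====
-- the loop body of A's 'for i in split' (branches in A's order; state = (new_string, counter))
def pvAstep (s : List Char) (st : List Char × Int) (i : List Char) : List Char × Int :=
  if i = s ++ "'s".toList ∨ i = s then (st.1, st.2 + 1)
  else if st.2 = 1 then (st.1 ++ s ++ "'s ".toList ++ i ++ " ".toList, 0)
  else if st.2 = 2 then (st.1 ++ "grand".toList ++ s ++ "'s ".toList ++ i ++ " ".toList, 0)
  else if st.2 > 2 then (st.1 ++ PySem.List.pyRepeat "great ".toList (st.2 - 2) ++ "grand".toList ++ s ++ "'s ".toList ++ i ++ " ".toList, 0)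
  else (st.1 ++ i ++ " ".toList, 0)

-- A's 'repeat again for outside of the loop' block
def pvAfinal (s : List Char) (st : List Char × Int) : List Char :=
  if st.2 = 1 then st.1 ++ s ++ "'s ".toList
  else if st.2 = 2 then st.1 ++ "grand".toList ++ s ++ "'s ".toList
  else if st.2 > 2 then st.1 ++ PySem.List.pyRepeat "great ".toList (st.2 - 2) ++ "grand".toList ++ s ++ "'s".toList
  else st.1

def relation_simplify_simple (string : String) (search_string : String) : String :=
  let s := search_string.toList
  let split := PySem.Chars.splitOnMax (PySem.Chars.strip string.toList) " ".toList (-1)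
  let st := split.foldl (pvAstep s) ([], 0)
  let new_string := PySem.Chars.strip (pvAfinal s st)
  if PySem.Chars.endswith new_string "'s".toList then
    String.ofList (PySem.List.slice new_string none (some (-2)))
  else String.ofList new_string

-- ===== PORT B =====
-- 't in matches'
def pvIsMatch (s : List Char) (t : List Char) : Bool := t == s ++ "'s".toList || t == s

-- Source B's _prefix helper
def pvPrefix (s : List Char) (n : Nat) : List Char :=
  if n = 1 then s ++ "'s".toList
  else PySem.List.pyRepeat "great ".toList ((n : Int) - 2) ++ "grand".toList ++ s ++ "'s".toList

-- hand port of itertools.groupby(xs, key=f) with a Bool key (PySem has no groupby):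
-- yields the (key, run) pairs of maximal runs of equal key, in order — exact for finite lists
def pvGroupby {α : Type} (f : α → Bool) : List α → List (Bool × List α)
  | [] => []
  | a :: rest =>
    (f a, a :: rest.takeWhile (fun x => f x == f a)) ::
      pvGroupby f (rest.dropWhile (fun x => f x == f a))
termination_by l => l.length
decreasing_by
  exact Nat.lt_succ_of_le (List.length_dropWhile_le _ _)

-- Source B's loop body over the groups (state = (out, pending))
def pvBstep (s : List Char) (st : List (List Char) × Option (List Char)) (g : Bool × List (List Char)) :
    List (List Char) × Option (List Char) :=
  if g.1 then (st.1, some (pvPrefix s g.2.length))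
  else
    match st.2 with
    | some p => (st.1 ++ p :: g.2, none)
    | none => (st.1 ++ g.2, none)

-- Source B's trailing 'if pending is not None: out.append(pending)'
def pvBout (st : List (List Char) × Option (List Char)) : List (List Char) :=
  match st.2 with
  | some p => st.1 ++ [p]
  | none => st.1

def relation_simplify_simple_alt (string : String) (search_string : String) : String :=
  let s := search_string.toList
  let toks := PySem.Chars.splitOnMax (PySem.Chars.strip string.toList) " ".toList (-1)
  let out := pvBout ((pvGroupby (pvIsMatch s) toks).foldl (pvBstep s) ([], none))
  let result := PySem.Chars.strip (PySem.Chars.join " ".toList out)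
  if PySem.Chars.endswith result "'s".toList then
    String.ofList (PySem.List.slice result none (some (-2)))
  else String.ofList result

-- ===== PRECONDITION & SPEC =====
def Spec_relation_simplify_simple (string : String) (search_string : String) (out : String) : Prop := out = relation_simplify_simple_alt string search_string
instance (string : String) (search_string : String) (out : String) : Decidable (Spec_relation_simplify_simple string search_string out) := by unfold Spec_relation_simplify_simple; infer_instance

-- ===== CLAIM (what is proved, stated in full; the proofs are below) =====
def Claim_equal_relation_simplify_simple : Prop := ∀ (string : String) (search_string : String), Dom_relation_simplify_simple string search_string → Spec_relation_simplify_simple string search_string (relation_simplify_simple string search_string)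

-- ===== LEMMAS AND PROOFS =====

-- closed char-list facts about the string literals the two ports use
lemma pv_s_space : "'s ".toList = "'s".toList ++ [' '] := by decide
lemma pv_space : " ".toList = [' '] := by decide

-- the Int counter's prefix word (pvAfinal/pvAstep's great/grand text, without its trailing space)
def pvPrefixI (s : List Char) (c : Int) : List Char :=
  if c = 1 then s ++ "'s".toList
  else PySem.List.pyRepeat "great ".toList (c - 2) ++ "grand".toList ++ s ++ "'s".toList

-- the token list B emits, computed token-by-token with A's counter
def pvT (s : List Char) : List (List Char) → Int → List (List Char)
  | [], c => if 1 ≤ c then [pvPrefixI s c] else []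
  | t :: ts, c =>
    if pvIsMatch s t then pvT s ts (c + 1)
    else (if 1 ≤ c then [pvPrefixI s c] else []) ++ t :: pvT s ts 0

-- the string A emits from counter c onwards
def pvE (s : List Char) : List (List Char) → Int → List Char
  | [], c => pvAfinal s ([], c)
  | t :: ts, c => (pvAstep s ([], c) t).1 ++ pvE s ts (pvAstep s ([], c) t).2

def pvConcatSp (ts : List (List Char)) : List Char := ts.flatMap (· ++ [' '])

lemma pvAstep_shift (s : List Char) (acc : List Char) (c : Int) (t : List Char) :
    pvAstep s (acc, c) t = (acc ++ (pvAstep s ([], c) t).1, (pvAstep s ([], c) t).2) := by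
  simp only [pvAstep]
  split_ifs <;> simp

lemma pvAfinal_shift (s : List Char) (acc : List Char) (c : Int) :
    pvAfinal s (acc, c) = acc ++ pvAfinal s ([], c) := by
  simp only [pvAfinal]
  split_ifs <;> simp

-- A's fold-then-final equals the structural emission pvE
lemma pvA_fold_eq (s : List Char) (toks : List (List Char)) (acc : List Char) (c : Int) :
    pvAfinal s (toks.foldl (pvAstep s) (acc, c)) = acc ++ pvE s toks c := by
  induction toks generalizing acc c with
  | nil => simpa [pvE] using pvAfinal_shift s acc c
  | cons t ts ih =>
    simp only [List.foldl_cons, pvE]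
    rw [pvAstep_shift, ih, List.append_assoc]

lemma pvT_all_match (s : List Char) (g ts : List (List Char)) (c : Int)
    (hg : ∀ x ∈ g, pvIsMatch s x = true) :
    pvT s (g ++ ts) c = pvT s ts (c + g.length) := by
  induction g generalizing c with
  | nil => simp
  | cons a g' ih =>
    simp only [List.cons_append, pvT, hg a (by simp), if_pos]
    rw [ih _ (fun x hx => hg x (by simp [hx]))]
    congr 1
    simp only [List.length_cons]
    push_cast
    ring

lemma pvT_nonmatch_run (s : List Char) (g ts : List (List Char))
    (hg : ∀ x ∈ g, pvIsMatch s x = false) :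
    pvT s (g ++ ts) 0 = g ++ pvT s ts 0 := by
  induction g with
  | nil => simp
  | cons a g' ih =>
    simp only [List.cons_append, pvT, hg a (by simp)]
    simp only [Bool.false_eq_true, if_false]
    norm_num
    exact ih (fun x hx => hg x (by simp [hx]))

lemma pvPrefix_eq (s : List Char) (n : Nat) (hn : 1 ≤ n) :
    pvPrefix s n = pvPrefixI s (n : Int) := by
  simp only [pvPrefix, pvPrefixI]
  rcases Nat.eq_or_lt_of_le hn with h | h
  · simp [← h]
  · have h1 : n ≠ 1 := by omega
    have h2 : (n : Int) ≠ 1 := by exact_mod_cast h1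
    simp [h1, h2]

-- B's groups-fold equals pvT (precondition: counter 0, or the next token does not match)
lemma pvB_fold_eq (s : List Char) (toks : List (List Char)) :
    ∀ (acc : List (List Char)) (c : Int), 0 ≤ c →
    (c = 0 ∨ ∀ t, toks.head? = some t → pvIsMatch s t = false) →
    pvBout ((pvGroupby (pvIsMatch s) toks).foldl (pvBstep s)
      (acc, if 1 ≤ c then some (pvPrefixI s c) else none)) = acc ++ pvT s toks c := by
  induction toks using pvGroupby.induct (f := pvIsMatch s) with
  | case1 =>
    intro acc c hc hok
    simp only [pvGroupby, List.foldl_nil, pvBout, pvT]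
    split_ifs <;> simp
  | case2 a rest ih =>
    intro acc c hc hok
    have hsplit := List.takeWhile_append_dropWhile
      (p := fun x => pvIsMatch s x == pvIsMatch s a) (l := rest)
    have hok' : ∀ t, (rest.dropWhile (fun x => pvIsMatch s x == pvIsMatch s a)).head? = some t →
        (pvIsMatch s t == pvIsMatch s a) = false := by
      intro t ht
      have hne : rest.dropWhile (fun x => pvIsMatch s x == pvIsMatch s a) ≠ [] := by
        intro h; rw [h] at ht; simp at ht
      have h2 := List.head_dropWhile_not (fun x => pvIsMatch s x == pvIsMatch s a) hne
      rw [List.head?_eq_head hne, Option.some_inj] at ht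
      rw [← ht]
      exact h2
    rw [pvGroupby]
    by_cases hma : pvIsMatch s a = true
    ·
      have hc0 : c = 0 := by
        rcases hok with h | h
        · exact h
        · have := h a (by simp)
          rw [hma] at this; cases this
      subst hc0
      simp only [List.foldl_cons]
      have hstep : pvBstep s (acc, if (1:Int) ≤ 0 then some (pvPrefixI s 0) else none)
          ((pvIsMatch s a, a :: rest.takeWhile (fun x => pvIsMatch s x == pvIsMatch s a))) =
          (acc, some (pvPrefix s (a :: rest.takeWhile (fun x => pvIsMatch s x == pvIsMatch s a)).length)) := by
        simp [pvBstep, hma]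
      rw [hstep]
      have hall : ∀ x ∈ a :: rest.takeWhile (fun x => pvIsMatch s x == pvIsMatch s a),
          pvIsMatch s x = true := by
        intro x hx
        rcases List.mem_cons.mp hx with h | hx'
        · rw [h]; exact hma
        · have := List.mem_takeWhile_imp hx'
          rw [hma] at this; simpa using this
      have hlen1 : (1:Int) ≤ ((a :: rest.takeWhile (fun x => pvIsMatch s x == pvIsMatch s a)).length : Int) := by
        simp only [List.length_cons]; push_cast; omega
      have hrec := ih acc ((a :: rest.takeWhile (fun x => pvIsMatch s x == pvIsMatch s a)).length : Int)
        (by positivity)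
        (Or.inr (by
          intro t ht
          have := hok' t ht
          rw [hma] at this; simpa using this))
      rw [if_pos hlen1] at hrec
      rw [← pvPrefix_eq s _ (by simp)] at hrec
      rw [hrec]
      congr 1
      conv_rhs => rw [show a :: rest =
        (a :: rest.takeWhile (fun x => pvIsMatch s x == pvIsMatch s a)) ++
          rest.dropWhile (fun x => pvIsMatch s x == pvIsMatch s a) by
            simp [hsplit]]
      rw [pvT_all_match s _ _ 0 hall]
      norm_num
    · have hma : pvIsMatch s a = false := by simpa using hma
      have hallf : ∀ x ∈ a :: rest.takeWhile (fun x => pvIsMatch s x == pvIsMatch s a),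
          pvIsMatch s x = false := by
        intro x hx
        rcases List.mem_cons.mp hx with h | hx'
        · rw [h]; exact hma
        · have := List.mem_takeWhile_imp hx'
          rw [hma] at this; simpa using this
      simp only [List.foldl_cons]
      have hstep : pvBstep s (acc, if 1 ≤ c then some (pvPrefixI s c) else none)
          ((pvIsMatch s a, a :: rest.takeWhile (fun x => pvIsMatch s x == pvIsMatch s a))) =
          (acc ++ (if 1 ≤ c then [pvPrefixI s c] else []) ++
            (a :: rest.takeWhile (fun x => pvIsMatch s x == pvIsMatch s a)), none) := by
        simp only [pvBstep, hma, Bool.false_eq_true, if_false]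
        split_ifs <;> simp
      rw [hstep]
      have hrec := ih (acc ++ (if 1 ≤ c then [pvPrefixI s c] else []) ++
          (a :: rest.takeWhile (fun x => pvIsMatch s x == pvIsMatch s a))) 0 le_rfl (Or.inl rfl)
      have h10 : ¬ ((1:Int) ≤ 0) := by norm_num
      simp only [if_neg h10] at hrec
      rw [hrec]
      have hT : pvT s (a :: rest) c =
          (if 1 ≤ c then [pvPrefixI s c] else []) ++
            ((a :: rest.takeWhile (fun x => pvIsMatch s x == pvIsMatch s a)) ++
              pvT s (rest.dropWhile (fun x => pvIsMatch s x == pvIsMatch s a)) 0) := by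
        conv_lhs => rw [show a :: rest =
          (a :: rest.takeWhile (fun x => pvIsMatch s x == pvIsMatch s a)) ++
            rest.dropWhile (fun x => pvIsMatch s x == pvIsMatch s a) by
              simp [hsplit]]
        rcases eq_or_lt_of_le hc with h | h
        · rw [← h, if_neg (show ¬ ((1:Int) ≤ 0) by norm_num)]
          exact pvT_nonmatch_run s _ _ hallf
        · rw [if_pos (by omega)]
          simp only [List.cons_append, pvT, hma, Bool.false_eq_true, if_false,
            if_pos (by omega : (1:Int) ≤ c)]
          rw [pvT_nonmatch_run s _ _ (fun x hx => by simpa using List.mem_takeWhile_imp hx)]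
      rw [hT]
      simp [List.append_assoc]

-- pvE equals the space-joined pvT, up to one trailing space
lemma pvE_vs_concat (s : List Char) (toks : List (List Char)) (c : Int) (hc : 0 ≤ c) :
    pvE s toks c = pvConcatSp (pvT s toks c) ∨
    pvE s toks c ++ [' '] = pvConcatSp (pvT s toks c) := by
  induction toks generalizing c with
  | nil =>
    simp only [pvE, pvT, pvAfinal, pvConcatSp]
    rcases lt_or_ge c 1 with h | h
    · left
      rw [if_neg (show ¬ ((1:Int) ≤ c) by omega)]
      simp only [if_neg (by omega : ¬ c = 1), if_neg (by omega : ¬ c = 2),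
        if_neg (by omega : ¬ c > 2)]
      simp
    · rw [if_pos h]
      rcases eq_or_lt_of_le h with h1 | h1
      · left
        rw [← h1]
        simp [pvPrefixI, pv_s_space]
      · rcases eq_or_lt_of_le (by omega : (2:Int) ≤ c) with h2 | h2
        · left
          rw [← h2]
          simp [pvPrefixI, PySem.List.pyRepeat, pv_s_space]
        · right
          simp only [if_neg (by omega : ¬ c = 2), if_pos (by omega : c > 2), pvPrefixI,
            if_neg (by omega : ¬ c = 1)]
          simp
  | cons t ts ih =>
    simp only [pvE, pvT]
    cases hmt : pvIsMatch s t with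
    | true =>
      rw [if_pos rfl]
      have hm : t = s ++ "'s".toList ∨ t = s := by
        simp only [pvIsMatch, Bool.or_eq_true, beq_iff_eq] at hmt
        exact hmt
      simp only [pvAstep, if_pos hm]
      simpa using ih (c + 1) (by omega)
    | false =>
      rw [if_neg (by simp)]
      have hnm : ¬ (t = s ++ "'s".toList ∨ t = s) := by
        intro hor
        have hmt2 : pvIsMatch s t = true := by
          rcases hor with h | h <;> simp [pvIsMatch, h]
        rw [hmt] at hmt2; cases hmt2
      have hchunk : (pvAstep s ([], c) t).1 =
          pvConcatSp ((if 1 ≤ c then [pvPrefixI s c] else []) ++ [t]) ∧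
          (pvAstep s ([], c) t).2 = 0 := by
        simp only [pvAstep, if_neg hnm, pvConcatSp, pvPrefixI]
        rcases lt_or_ge c 1 with h | h
        · rw [if_neg (by omega : ¬ c = 1), if_neg (by omega : ¬ c = 2),
            if_neg (by omega : ¬ c > 2), if_neg (by omega : ¬ (1:Int) ≤ c)]
          simp
        · rcases eq_or_lt_of_le h with h1 | h1
          · rw [if_pos h1.symm, if_pos (by omega), if_pos h1.symm]
            simp [pv_s_space]
          · rcases eq_or_lt_of_le (by omega : (2:Int) ≤ c) with h2 | h2
            · rw [if_neg (by omega), if_pos h2.symm, if_pos (by omega), if_neg (by omega)]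
              rw [← h2]
              simp [PySem.List.pyRepeat, pv_s_space]
            · rw [if_neg (by omega), if_neg (by omega), if_pos (by omega), if_pos (by omega),
                if_neg (by omega)]
              simp [pv_s_space]
      rcases ih 0 le_rfl with h | h
      · left
        rw [hchunk.2, hchunk.1, h]
        simp [pvConcatSp]
      · right
        rw [hchunk.2, hchunk.1]
        simp only [pvConcatSp, List.flatMap_append] at h ⊢
        simp [← h]

lemma pvConcatSp_eq_join (ts : List (List Char)) (h : ts ≠ []) :
    pvConcatSp ts = PySem.Chars.join [' '] ts ++ [' '] := by
  induction ts with
  | nil => cases h rfl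
  | cons t ts ih =>
    cases ts with
    | nil => simp [pvConcatSp, PySem.Chars.join, List.intercalate]
    | cons u ts' =>
      have hih := ih (by simp)
      simp only [pvConcatSp, List.flatMap_cons] at hih ⊢
      rw [PySem.Chars.join_cons_cons, hih]
      simp [List.append_assoc]

lemma pv_isspace_space : PySem.Chars.isspace ' ' = true := by decide

lemma pvStrip_space (u : List Char) :
    PySem.Chars.strip (u ++ [' ']) = PySem.Chars.strip u := by
  simp only [PySem.Chars.strip, PySem.Chars.lstrip, PySem.Chars.rstrip]
  rw [List.dropWhile_append]
  rcases h : (List.dropWhile PySem.Chars.isspace u).isEmpty with _ | _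
  · rw [if_neg (by simp [h])]
    rw [List.reverse_append]
    simp [pv_isspace_space]
  · rw [if_pos (by simp [h])]
    rw [List.isEmpty_iff.mp h]
    simp [pv_isspace_space]

lemma pvStrip_E_join (s : List Char) (toks : List (List Char)) :
    PySem.Chars.strip (pvE s toks 0) =
      PySem.Chars.strip (PySem.Chars.join [' '] (pvT s toks 0)) := by
  rcases pvE_vs_concat s toks 0 le_rfl with h | h
  · rcases eq_or_ne (pvT s toks 0) [] with hT | hT
    · rw [hT] at h ⊢
      simp only [pvConcatSp, List.flatMap_nil] at h
      rw [h]
      simp [PySem.Chars.join, List.intercalate]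
    · rw [pvConcatSp_eq_join _ hT] at h
      rw [h, pvStrip_space]
  · rcases eq_or_ne (pvT s toks 0) [] with hT | hT
    · rw [hT] at h
      simp only [pvConcatSp, List.flatMap_nil] at h
      cases List.append_ne_nil_of_right_ne_nil _ (by simp : ([' '] : List Char) ≠ []) h
    · rw [pvConcatSp_eq_join _ hT] at h
      rw [List.append_cancel_right h]

theorem relation_simplify_simple_spec : Claim_equal_relation_simplify_simple := by
  intro string search_string _
  unfold Spec_relation_simplify_simple
  simp only [relation_simplify_simple, relation_simplify_simple_alt]
  have hA : pvAfinal search_string.toList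
      ((PySem.Chars.splitOnMax (PySem.Chars.strip string.toList) " ".toList (-1)).foldl
        (pvAstep search_string.toList) ([], 0)) =
      pvE search_string.toList
        (PySem.Chars.splitOnMax (PySem.Chars.strip string.toList) " ".toList (-1)) 0 := by
    simpa using pvA_fold_eq search_string.toList
      (PySem.Chars.splitOnMax (PySem.Chars.strip string.toList) " ".toList (-1)) [] 0
  have hB : pvBout ((pvGroupby (pvIsMatch search_string.toList)
        (PySem.Chars.splitOnMax (PySem.Chars.strip string.toList) " ".toList (-1))).foldl
        (pvBstep search_string.toList) ([], none)) =
      pvT search_string.toList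
        (PySem.Chars.splitOnMax (PySem.Chars.strip string.toList) " ".toList (-1)) 0 := by
    have h := pvB_fold_eq search_string.toList
      (PySem.Chars.splitOnMax (PySem.Chars.strip string.toList) " ".toList (-1)) [] 0
      le_rfl (Or.inl rfl)
    rw [if_neg (show ¬((1:Int) ≤ 0) by norm_num)] at h
    simpa using h
  rw [hA, hB, pv_space, pvStrip_E_join]
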